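-- pv_equiv track=rewrite | github.com/Abdallah0101/Hotel-Solving-Problem | 6- Elian mariano.py | compare_hotels_result
-- ===== SOURCE A (Python) =====
-- hotels = [
--     {"star": 3, "regular": {"week_day": 110, "weekend": 90}, "rewards": {"week_day": 80, "weekend": 80}},
--     {"star": 4, "regular": {"week_day": 160, "weekend": 60}, "rewards": {"week_day": 110, "weekend": 50}},
--     {"star": 5, "regular": {"week_day": 220, "weekend": 150}, "rewards": {"week_day": 100, "weekend": 40}}
-- ]
--
-- def compare_hotels_result(result):
--     maxindex, maxvalue = 0, result[0]
--
--     for i in range(0, len(result)):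
--         if result[i] < maxvalue:
--             maxindex = i
--             maxvalue = result[i]
--         elif result[i] == maxvalue and hotels[i]['star'] > hotels[maxindex]['star']:
--             maxindex = i
--             maxvalue = result[i]
--
--     if maxindex == 0:
--         return "Lakewood"
--     if maxindex == 1:
--         return "Bridgewood"
--     return "Ridgewood"
-- ===== SOURCE B (Python) =====
-- hotels = [
--     {"star": 3, "regular": {"week_day": 110, "weekend": 90}, "rewards": {"week_day": 80, "weekend": 80}},
--     {"star": 4, "regular": {"week_day": 160, "weekend": 60}, "rewards": {"week_day": 110, "weekend": 50}},
--     {"star": 5, "regular": {"week_day": 220, "weekend": 150}, "rewards": {"week_day": 100, "weekend": 40}}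
-- ]
--
-- def compare_hotels_result(result):
--     order = sorted(range(len(result)), key=lambda i: (result[i], -hotels[i]["star"]))
--     best = order[0]
--     if best == 0:
--         return "Lakewood"
--     if best == 1:
--         return "Bridgewood"
--     return "Ridgewood"
-- ===== Notes on version B (the rewrite author's own statement) =====
-- stated objective: alternative
-- what changed: Replaces the manual running-minimum scan with star tie-break by sorting the index list on the key (cost, -star) and taking the first index of the sorted order.
-- outside the precondition, e.g. on compare_hotels_result([4, 3, 2, 1]): A returns 'Ridgewood', B raises IndexError; on compare_hotels_result([]): A raises IndexError, B raises IndexError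
import Mathlib
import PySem

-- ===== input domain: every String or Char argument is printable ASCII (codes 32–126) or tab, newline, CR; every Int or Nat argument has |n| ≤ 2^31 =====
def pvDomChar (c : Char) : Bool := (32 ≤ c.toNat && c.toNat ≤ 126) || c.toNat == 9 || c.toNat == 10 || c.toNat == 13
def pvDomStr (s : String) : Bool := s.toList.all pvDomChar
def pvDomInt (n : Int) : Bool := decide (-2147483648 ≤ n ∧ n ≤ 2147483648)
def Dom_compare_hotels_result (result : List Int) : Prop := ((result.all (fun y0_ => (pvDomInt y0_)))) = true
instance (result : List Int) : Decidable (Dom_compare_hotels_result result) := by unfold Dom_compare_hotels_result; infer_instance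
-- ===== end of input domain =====

-- B replaces A's manual min-scan with a sort of indices by the key (cost, -star) and takes the first index (alternative decomposition, same behaviour on the 3-hotel domain).


-- the module constant hotels, reduced to the 'star' values the function reads
def pvStars : List Int := [3, 4, 5]

-- ===== PORT A =====
def compare_hotels_result (result : List Int) : String :=
  let init : Int × Int := (0, (PySem.List.pyGet? result 0).getD 0)
  let s := (PySem.List.pyRange 0 result.length 1).foldl
    (fun (st : Int × Int) i =>
      let v := (PySem.List.pyGet? result i).getD 0
      if v < st.2 then (i, v)
      else if v = st.2 ∧
          (PySem.List.pyGet? pvStars i).getD 0 > (PySem.List.pyGet? pvStars st.1).getD 0 then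
        (i, v)
      else st) init
  if s.1 = 0 then "Lakewood"
  else if s.1 = 1 then "Bridgewood"
  else "Ridgewood"

-- ===== PORT B =====
def compare_hotels_result_alt (result : List Int) : String :=
  let order := PySem.List.sorted2 (PySem.List.pyRange 0 result.length 1)
      (fun i => (PySem.List.pyGet? result i).getD 0)
      (fun i => -((PySem.List.pyGet? pvStars i).getD 0))
  let best := (PySem.List.pyGet? order 0).getD 0
  if best = 0 then "Lakewood"
  else if best = 1 then "Bridgewood"
  else "Ridgewood"

-- ===== PRECONDITION & SPEC =====
-- Pre_ is the natural domain of the 3-entry hotels table: the empty list is excluded because A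
-- raises IndexError there, and lists longer than 3 because indexing the hotels table past its end
-- makes A either raise IndexError or return a name without any star rating to consult, while B
-- always raises IndexError on such lists.
def Pre_compare_hotels_result (result : List Int) : Prop :=
  result ≠ [] ∧ result.length ≤ 3
instance (result : List Int) : Decidable (Pre_compare_hotels_result result) := by
  unfold Pre_compare_hotels_result; infer_instance

def pvWitness_compare_hotels_result : List Int := ([110, 60, 150])

def Spec_compare_hotels_result (result : List Int) (out : String) : Prop := out = compare_hotels_result_alt result
instance (result : List Int) (out : String) : Decidable (Spec_compare_hotels_result result out) := by unfold Spec_compare_hotels_result; infer_instance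

-- ===== CLAIM (what is proved, stated in full; the proofs are below) =====
def Claim_equal_compare_hotels_result : Prop := ∀ (result : List Int), Dom_compare_hotels_result result → Pre_compare_hotels_result result → Spec_compare_hotels_result result (compare_hotels_result result)

-- ===== LEMMAS AND PROOFS =====

theorem pvRange3 : PySem.List.pyRange 0 (3:Int) 1 = [0, 1, 2] := by decide

theorem pvAB1 (a : Int) : compare_hotels_result [a] = compare_hotels_result_alt [a] := by
  unfold compare_hotels_result compare_hotels_result_alt
  norm_num [PySem.List.sorted2, PySem.List.insertBy, PySem.List.pyGet?, PySem.List.pyIdx?,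
    pvStars, show PySem.List.pyRange 0 (1:Int) 1 = [0] from by decide]

theorem pvAB2 (a b : Int) : compare_hotels_result [a, b] = compare_hotels_result_alt [a, b] := by
  unfold compare_hotels_result compare_hotels_result_alt
  rcases lt_trichotomy b a with h1|h1|h1
  · norm_num [PySem.List.sorted2, PySem.List.insertBy, PySem.List.pyGet?, PySem.List.pyIdx?, pvStars, show Int.toNat 2 = 2 from rfl, show PySem.List.pyRange 0 (2:Int) 1 = [0, 1] from by decide, h1, h1.ne, h1.ne', h1.asymm]
  · norm_num [PySem.List.sorted2, PySem.List.insertBy, PySem.List.pyGet?, PySem.List.pyIdx?, pvStars, show Int.toNat 2 = 2 from rfl, show PySem.List.pyRange 0 (2:Int) 1 = [0, 1] from by decide, h1]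
  · norm_num [PySem.List.sorted2, PySem.List.insertBy, PySem.List.pyGet?, PySem.List.pyIdx?, pvStars, show Int.toNat 2 = 2 from rfl, show PySem.List.pyRange 0 (2:Int) 1 = [0, 1] from by decide, h1, h1.ne, h1.ne', h1.asymm]

set_option maxHeartbeats 2000000 in
theorem pvAB3 (a b c : Int) : compare_hotels_result [a, b, c] = compare_hotels_result_alt [a, b, c] := by
  unfold compare_hotels_result compare_hotels_result_alt
  rcases lt_trichotomy b a with h1|h1|h1 <;> rcases lt_trichotomy c a with h2|h2|h2 <;>
    rcases lt_trichotomy c b with h3|h3|h3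
  · norm_num [PySem.List.sorted2, PySem.List.insertBy, PySem.List.pyGet?, PySem.List.pyIdx?, pvStars, pvRange3, show Int.toNat 2 = 2 from rfl, h1, h1.ne, h1.ne', h1.asymm, h2, h2.ne, h2.ne', h2.asymm, h3, h3.ne, h3.ne', h3.asymm]
  · norm_num [PySem.List.sorted2, PySem.List.insertBy, PySem.List.pyGet?, PySem.List.pyIdx?, pvStars, pvRange3, show Int.toNat 2 = 2 from rfl, h1, h1.ne, h1.ne', h1.asymm, h2, h2.ne, h2.ne', h2.asymm, h3]
  · norm_num [PySem.List.sorted2, PySem.List.insertBy, PySem.List.pyGet?, PySem.List.pyIdx?, pvStars, pvRange3, show Int.toNat 2 = 2 from rfl, h1, h1.ne, h1.ne', h1.asymm, h2, h2.ne, h2.ne', h2.asymm, h3, h3.ne, h3.ne', h3.asymm]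
  · exfalso; omega
  · exfalso; omega
  · norm_num [PySem.List.sorted2, PySem.List.insertBy, PySem.List.pyGet?, PySem.List.pyIdx?, pvStars, pvRange3, show Int.toNat 2 = 2 from rfl, h1, h1.ne, h1.ne', h1.asymm, h2, h3, h3.ne, h3.ne', h3.asymm]
  · exfalso; omega
  · exfalso; omega
  · norm_num [PySem.List.sorted2, PySem.List.insertBy, PySem.List.pyGet?, PySem.List.pyIdx?, pvStars, pvRange3, show Int.toNat 2 = 2 from rfl, h1, h1.ne, h1.ne', h1.asymm, h2, h2.ne, h2.ne', h2.asymm, h3, h3.ne, h3.ne', h3.asymm]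
  · norm_num [PySem.List.sorted2, PySem.List.insertBy, PySem.List.pyGet?, PySem.List.pyIdx?, pvStars, pvRange3, show Int.toNat 2 = 2 from rfl, h1, h2, h2.ne, h2.ne', h2.asymm, h3, h3.ne, h3.ne', h3.asymm]
  · exfalso; omega
  · exfalso; omega
  · exfalso; omega
  · norm_num [PySem.List.sorted2, PySem.List.insertBy, PySem.List.pyGet?, PySem.List.pyIdx?, pvStars, pvRange3, show Int.toNat 2 = 2 from rfl, h1, h2, h3]
  · exfalso; omega
  · exfalso; omega
  · exfalso; omega
  · norm_num [PySem.List.sorted2, PySem.List.insertBy, PySem.List.pyGet?, PySem.List.pyIdx?, pvStars, pvRange3, show Int.toNat 2 = 2 from rfl, h1, h2, h2.ne, h2.ne', h2.asymm, h3, h3.ne, h3.ne', h3.asymm]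
  · norm_num [PySem.List.sorted2, PySem.List.insertBy, PySem.List.pyGet?, PySem.List.pyIdx?, pvStars, pvRange3, show Int.toNat 2 = 2 from rfl, h1, h1.ne, h1.ne', h1.asymm, h2, h2.ne, h2.ne', h2.asymm, h3, h3.ne, h3.ne', h3.asymm]
  · exfalso; omega
  · exfalso; omega
  · norm_num [PySem.List.sorted2, PySem.List.insertBy, PySem.List.pyGet?, PySem.List.pyIdx?, pvStars, pvRange3, show Int.toNat 2 = 2 from rfl, h1, h1.ne, h1.ne', h1.asymm, h2, h3, h3.ne, h3.ne', h3.asymm]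
  · exfalso; omega
  · exfalso; omega
  · norm_num [PySem.List.sorted2, PySem.List.insertBy, PySem.List.pyGet?, PySem.List.pyIdx?, pvStars, pvRange3, show Int.toNat 2 = 2 from rfl, h1, h1.ne, h1.ne', h1.asymm, h2, h2.ne, h2.ne', h2.asymm, h3, h3.ne, h3.ne', h3.asymm]
  · norm_num [PySem.List.sorted2, PySem.List.insertBy, PySem.List.pyGet?, PySem.List.pyIdx?, pvStars, pvRange3, show Int.toNat 2 = 2 from rfl, h1, h1.ne, h1.ne', h1.asymm, h2, h2.ne, h2.ne', h2.asymm, h3]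
  · norm_num [PySem.List.sorted2, PySem.List.insertBy, PySem.List.pyGet?, PySem.List.pyIdx?, pvStars, pvRange3, show Int.toNat 2 = 2 from rfl, h1, h1.ne, h1.ne', h1.asymm, h2, h2.ne, h2.ne', h2.asymm, h3, h3.ne, h3.ne', h3.asymm]

-- ===== VERDICT (by name: the statement is the Claim_ definition above) =====
theorem compare_hotels_result_spec : Claim_equal_compare_hotels_result := by
  intro result _ hpre
  obtain ⟨hne, hlen⟩ := hpre
  unfold Spec_compare_hotels_result
  match result, hne, hlen with
  | [a], _, _ => exact pvAB1 a
  | [a, b], _, _ => exact pvAB2 a b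
  | [a, b, c], _, _ => exact pvAB3 a b c
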